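-- pv_equiv track=rewrite | github.com/ericmerle3789/Collatz-Junction-Theorem | scripts/research/r37_structural_lemma.py | count_residue_profiles_monotone
-- ===== SOURCE A (Python) =====
-- from math import comb, gcd, log2, ceil, log
--
-- def compute_S(k):
--     """Minimal S such that 2^S > 3^k. Exact via integer comparison."""
--     S = ceil(k * log2(3))
--     three_k = 3 ** k
--     while (1 << S) <= three_k:
--         S += 1
--     while S > 0 and (1 << (S - 1)) > three_k:
--         S -= 1
--     return S
--
-- def count_residue_profiles_monotone(k, p):
--     """
--     Count the number of DISTINCT residue signature profiles
--     (2^{B_0} mod p, ..., 2^{B_{k-1}} mod p) where B is monotone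
--     with B_{k-1} = S-k.
--     Returns (n_profiles, total_vectors).
--     """
--     S = compute_S(k)
--     max_B = S - k
--     nB = max_B + 1
--
--     # Precompute residues
--     res = [pow(2, b, p) for b in range(nB)]
--
--     # Enumerate monotone B-vectors and collect signature profiles
--     profiles = set()
--     count = [0]
--
--     def generate(j, prev_b, sig):
--         if j == k - 1:
--             # B_{k-1} = max_B forced
--             full_sig = sig + (res[max_B],)
--             profiles.add(full_sig)
--             count[0] += 1
--             return
--         for b in range(prev_b, nB):
--             generate(j + 1, b, sig + (res[b],))
--
--     # Only enumerate if feasible (C(k) not too large)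
--     C = comb(S - 1, k - 1)
--     if C > 500000:
--         return None, C  # Too many vectors
--
--     generate(0, 0, ())
--     return len(profiles), count[0]
-- ===== SOURCE B (Python) =====
-- from math import comb, ceil, log2
-- from itertools import combinations_with_replacement
--
--
-- def compute_S(k):
--     """Minimal S such that 2^S > 3^k. Exact via integer comparison."""
--     S = ceil(k * log2(3))
--     three_k = 3 ** k
--     while (1 << S) <= three_k:
--         S += 1
--     while S > 0 and (1 << (S - 1)) > three_k:
--         S -= 1
--     return S
--
--
-- def count_residue_profiles_monotone(k, p):
--     """
--     Count the number of DISTINCT residue signature profiles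
--     (2^{B_0} mod p, ..., 2^{B_{k-1}} mod p) where B is monotone
--     with B_{k-1} = S-k.
--     Returns (n_profiles, total_vectors).
--     """
--     S = compute_S(k)
--     C = comb(S - 1, k - 1)
--     if C > 500000:
--         return None, C  # Too many vectors
--
--     max_B = S - k
--     nB = max_B + 1
--     res = [pow(2, b, p) for b in range(nB)]
--
--     profiles = {
--         tuple(res[i] for i in combo) + (res[max_B],)
--         for combo in combinations_with_replacement(range(nB), k - 1)
--     }
--     return len(profiles), C
-- ===== Notes on version B (the rewrite author's own statement) =====
-- stated objective: idiomatic
-- what changed: Replaces the recursive generate() with its closure-mutated set and count[0] cell by a flat set comprehension over itertools.combinations_with_replacement(range(nB), k-1), hoists the comb(S-1,k-1) feasibility guard before any residue work, and returns C directly instead of counting leaves one by one.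
import Mathlib
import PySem

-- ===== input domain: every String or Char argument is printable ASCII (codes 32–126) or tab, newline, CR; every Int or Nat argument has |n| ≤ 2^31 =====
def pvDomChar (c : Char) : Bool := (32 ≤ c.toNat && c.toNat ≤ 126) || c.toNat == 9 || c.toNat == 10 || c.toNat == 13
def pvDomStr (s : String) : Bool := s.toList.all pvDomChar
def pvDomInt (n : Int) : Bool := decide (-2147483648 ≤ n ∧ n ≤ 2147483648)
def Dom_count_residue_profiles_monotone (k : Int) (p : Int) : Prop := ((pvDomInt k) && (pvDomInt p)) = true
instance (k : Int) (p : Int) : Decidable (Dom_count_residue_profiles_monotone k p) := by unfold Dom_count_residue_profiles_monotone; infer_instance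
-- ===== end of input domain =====

-- B replaces A's recursive generate()/mutable-set/counter machinery by a direct set
-- comprehension over itertools.combinations_with_replacement and returns comb(S-1,k-1)
-- instead of counting leaves one by one (objective: idiomatic; same asymptotic cost).

-- ===== PORT A =====
-- compute_S(k): the float seed ceil(k*log2(3)) is immediately corrected by the two exact
-- integer while-loops, whose unique fixed point is the minimal S ≥ 0 with 2^S > 3^k;
-- ported exactly as that search, starting from 0 (the float is only a starting guess and
-- cannot change the result).  Fuel 2*k+2 suffices since 3^k < 2^(2k+2) (proved below in
-- pvCsLoop_gt / pvComputeS_gt and used by the proofs, not by the claim).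
def pvCsLoop (three_k : Nat) : Nat → Nat → Nat
  | 0, S => S
  | fuel + 1, S => if 2 ^ S ≤ three_k then pvCsLoop three_k fuel (S + 1) else S

def compute_S (k : Int) : Int :=
  let three_k := 3 ^ k.toNat
  ((pvCsLoop three_k (2 * k.toNat + 2) 0 : Nat) : Int)

-- generate(j, prev_b, sig): recursion on the remaining depth m = (k-1) - j; the state is
-- the pair (profiles, count).  res[b] / res[max_B] are in range whenever Python's are, so
-- List.getD is exact there; range(prev_b, nB) is List.range' prev_b (nB - prev_b).
def pvGenA (res : List Int) (maxB nB : Nat) :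
    Nat → Nat → List Int → PySem.Set (List Int) × Int → PySem.Set (List Int) × Int
  | 0, _prev, sig, st => (PySem.Set.add st.1 (sig ++ [res.getD maxB 0]), st.2 + 1)
  | m + 1, prev, sig, st =>
      (List.range' prev (nB - prev)).foldl
        (fun st b => pvGenA res maxB nB m b (sig ++ [res.getD b 0]) st) st

-- comb(S-1, k-1): exact Python comb for S-1 ≥ 0 and k-1 ≥ 0 (guaranteed under Pre_).
def count_residue_profiles_monotone (k : Int) (p : Int) : Option Int × Int :=
  let S := compute_S k
  let max_B := S - k
  let nB := max_B + 1
  let res := (List.range nB.toNat).map (fun b => PySem.Int.powMod 2 b p)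
  let C : Int := ((S - 1).toNat.choose (k - 1).toNat : Int)
  if C > 500000 then (none, C)
  else
    let st := pvGenA res max_B.toNat nB.toNat (k - 1).toNat 0 [] (PySem.Set.empty, 0)
    (some (PySem.Set.len st.1), st.2)

-- ===== PORT B =====
-- itertools.combinations_with_replacement(range(n), r), generalised to a start index s
-- (the top-level call uses s = 0): all non-decreasing r-tuples over {s, …, n-1}.
def pvCwr (n : Nat) : Nat → Nat → List (List Nat)
  | _s, 0 => [[]]
  | s, r + 1 => (List.range' s (n - s)).flatMap (fun i => (pvCwr n i r).map (fun t => i :: t))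

def count_residue_profiles_monotone_alt (k : Int) (p : Int) : Option Int × Int :=
  let S := compute_S k
  let C : Int := ((S - 1).toNat.choose (k - 1).toNat : Int)
  if C > 500000 then (none, C)
  else
    let max_B := S - k
    let nB := max_B + 1
    let res := (List.range nB.toNat).map (fun b => PySem.Int.powMod 2 b p)
    let profiles : PySem.Set (List Int) :=
      PySem.Set.ofList ((pvCwr nB.toNat 0 (k - 1).toNat).map
        (fun combo => combo.map (fun i => res.getD i 0) ++ [res.getD max_B.toNat 0]))
    (some (PySem.Set.len profiles), C)

-- ===== PRECONDITION & SPEC =====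
-- Python A raises exactly on k ≤ 0 (math.comb raises ValueError on the negative k-1;
-- for k < 0 already 3**k is a float and 1 << S raises) and on p = 0 (pow(2, b, 0) raises
-- ValueError).  Pre_ excludes exactly those inputs.
def Pre_count_residue_profiles_monotone (k : Int) (p : Int) : Prop := 1 ≤ k ∧ p ≠ 0
instance (k : Int) (p : Int) : Decidable (Pre_count_residue_profiles_monotone k p) := by unfold Pre_count_residue_profiles_monotone; infer_instance
def pvWitness_count_residue_profiles_monotone : Int × Int := (3, 5)

def Spec_count_residue_profiles_monotone (k : Int) (p : Int) (out : Option Int × Int) : Prop := out = count_residue_profiles_monotone_alt k p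
instance (k : Int) (p : Int) (out : Option Int × Int) : Decidable (Spec_count_residue_profiles_monotone k p out) := by unfold Spec_count_residue_profiles_monotone; infer_instance

-- ===== CLAIM (what is proved, stated in full; the proofs are below) =====
def Claim_equal_count_residue_profiles_monotone : Prop := ∀ (k : Int) (p : Int), Dom_count_residue_profiles_monotone k p → Pre_count_residue_profiles_monotone k p → Spec_count_residue_profiles_monotone k p (count_residue_profiles_monotone k p)

-- ===== LEMMAS AND PROOFS =====

-- the full signature a leaf of generate() adds, as a function of the index combo
def pvProfile (res : List Int) (maxB : Nat) (sig : List Int) (c : List Nat) : List Int :=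
  sig ++ c.map (fun i => res.getD i 0) ++ [res.getD maxB 0]

lemma pvCsLoop_gt (t : Nat) : ∀ fuel s, t < 2 ^ (s + fuel) → t < 2 ^ pvCsLoop t fuel s := by
  intro fuel
  induction fuel with
  | zero => intro s h; simpa [pvCsLoop] using h
  | succ f ih =>
      intro s h
      simp only [pvCsLoop]
      split
      · have h' : t < 2 ^ (s + 1 + f) := by
          have e : s + 1 + f = s + (f + 1) := by omega
          rw [e]; exact h
        exact ih (s + 1) h'
      · omega

lemma pvComputeS_gt (k : Int) : 3 ^ k.toNat < 2 ^ (compute_S k).toNat := by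
  have h : (3 : Nat) ^ k.toNat < 2 ^ (0 + (2 * k.toNat + 2)) := by
    calc (3 : Nat) ^ k.toNat ≤ 4 ^ k.toNat := Nat.pow_le_pow_left (by norm_num) _
    _ = 2 ^ (2 * k.toNat) := by rw [show (4 : Nat) = 2 ^ 2 by norm_num, ← pow_mul]
    _ < 2 ^ (0 + (2 * k.toNat + 2)) := by
        exact Nat.pow_lt_pow_right (by norm_num) (by omega)
  have := pvCsLoop_gt (3 ^ k.toNat) (2 * k.toNat + 2) 0 h
  simpa [compute_S] using this

lemma pvComputeS_gt_k (k : Int) (hk : 1 ≤ k) : k + 1 ≤ compute_S k := by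
  have h := pvComputeS_gt k
  have h2 : (2 : Nat) ^ k.toNat < 2 ^ (compute_S k).toNat := by
    calc (2 : Nat) ^ k.toNat ≤ 3 ^ k.toNat := Nat.pow_le_pow_left (by norm_num) _
    _ < 2 ^ (compute_S k).toNat := h
  have h3 : k.toNat < (compute_S k).toNat := by
    exact (Nat.pow_lt_pow_iff_right (by norm_num)).mp h2
  have h0 : (0 : Int) ≤ compute_S k := by simp [compute_S]
  omega

-- generate() characterised: it folds every full signature of the monotone suffixes into
-- the profile set and adds one to the counter per leaf, i.e. per element of pvCwr.
lemma pvGenA_spec (res : List Int) (maxB nB : Nat) :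
    ∀ m prev sig st, pvGenA res maxB nB m prev sig st =
      (((pvCwr nB prev m).map (pvProfile res maxB sig)).foldl PySem.Set.add st.1,
        st.2 + ((pvCwr nB prev m).length : Int)) := by
  intro m
  induction m with
  | zero => intro prev sig st; simp [pvGenA, pvCwr, pvProfile]
  | succ m ih =>
      intro prev sig st
      simp only [pvGenA, pvCwr]
      -- inner induction over the iteration list of the for-loop
      have inner : ∀ (bs : List Nat) (st : PySem.Set (List Int) × Int),
          bs.foldl (fun st b => pvGenA res maxB nB m b (sig ++ [res.getD b 0]) st) st =
          (((bs.flatMap (fun i => (pvCwr nB i m).map (fun t => i :: t))).map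
              (pvProfile res maxB sig)).foldl PySem.Set.add st.1,
            st.2 + ((bs.flatMap (fun i => (pvCwr nB i m).map (fun t => i :: t))).length : Int)) := by
        intro bs
        induction bs with
        | nil => intro st; simp
        | cons b bs ihb =>
            intro st
            rw [List.foldl_cons, ih, ihb]
            simp only [List.flatMap_cons, List.map_append, List.foldl_append,
              List.length_append, List.length_map, List.map_map, Prod.mk.injEq]
            refine ⟨?_, ?_⟩
            · congr 2
              refine List.map_congr_left (fun c _ => ?_)
              simp [pvProfile, Function.comp]
            · push_cast; ring
      exact inner _ st

-- |combinations_with_replacement({s..n-1}, r)| = C(n-s+r-1, r) (stars and bars);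
-- the inner sum is Pascal's rule applied (n-s) times.
lemma pvCwr_len_inner (n r : Nat)
    (IH : ∀ s, (pvCwr n s r).length = (n - s + r - 1).choose r) :
    ∀ d, d ≤ n →
      ((List.range' (n - d) d).map (fun b => (pvCwr n b r).length)).sum = (d + r).choose (r + 1) := by
  intro d
  induction d with
  | zero => intro _; simp
  | succ d ihd =>
      intro hd
      have h1 : n - (d + 1) + 1 = n - d := by omega
      rw [List.range'_succ, List.map_cons, List.sum_cons, h1, ihd (by omega), IH]
      have h2 : n - (n - (d + 1)) + r - 1 = d + r := by omega
      rw [h2, ← Nat.choose_succ_succ]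
      congr 1
      omega

lemma pvCwr_length (n : Nat) : ∀ r s, (pvCwr n s r).length = (n - s + r - 1).choose r := by
  intro r
  induction r with
  | zero => intro s; simp [pvCwr]
  | succ r ih =>
      intro s
      simp only [pvCwr, List.length_flatMap, List.length_map]
      have hidx : n - s + (r + 1) - 1 = n - s + r := by omega
      rw [hidx]
      by_cases hs : s ≤ n
      · have h1 : n - (n - s) = s := by omega
        have := pvCwr_len_inner n r ih (n - s) (by omega)
        rw [h1] at this
        rw [this]
      · have h0 : n - s = 0 := by omega
        simp [h0]

-- ===== VERDICT (by name: the statement is the Claim_ definition above) =====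
theorem count_residue_profiles_monotone_spec : Claim_equal_count_residue_profiles_monotone := by
  intro k p _hdom hpre
  obtain ⟨hk, _hp⟩ := hpre
  unfold Spec_count_residue_profiles_monotone
  unfold count_residue_profiles_monotone count_residue_profiles_monotone_alt
  simp only []
  set S := compute_S k with hS
  set C : Int := ((S - 1).toNat.choose (k - 1).toNat : Int) with hC
  by_cases hbig : C > 500000
  · simp [hbig]
  · simp only [hbig, if_false]
    have hSk : k + 1 ≤ S := pvComputeS_gt_k k hk
    have hS0 : (0 : Int) ≤ S := by omega
    set res := (List.range (S - k + 1).toNat).map (fun b => PySem.Int.powMod 2 b p) with hres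
    rw [pvGenA_spec]
    simp only [Prod.mk.injEq]
    refine ⟨?_, ?_⟩
    · -- the profile sets are the same fold over the same list
      rw [PySem.Set.ofList_eq_foldl]
      have hmap : List.map (pvProfile res (S - k).toNat []) (pvCwr (S - k + 1).toNat 0 (k - 1).toNat) =
          List.map (fun combo => List.map (fun i => res.getD i 0) combo ++ [res.getD (S - k).toNat 0])
            (pvCwr (S - k + 1).toNat 0 (k - 1).toNat) :=
        List.map_congr_left (fun c _ => by simp [pvProfile])
      rw [hmap]
      rfl
    · -- count[0] = number of leaves = C(S-1, k-1)
      rw [pvCwr_length]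
      have hidx : (S - k + 1).toNat - 0 + (k - 1).toNat - 1 = (S - 1).toNat := by omega
      rw [hidx]
      simp [hC]
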